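-- pv_equiv track=rewrite | github.com/Lucenix/LA2 | treino1/torneio1.py | formula1
-- ===== SOURCE A (Python) =====
-- def formula1(log):
--     ha = {}
--     sets = set()
--     mintemp = -1
--     for entry in sorted(log):
--         if mintemp == -1:
--             mintemp = entry[0]
--
--         if (entry[0] - ha.get(entry[1], 0))<=mintemp:
--             if (entry[0] - ha.get(entry[1], 0))<mintemp:
--                 sets.clear()
--                 mintemp = entry[0] - ha[entry[1]]
--             sets.add(entry[1])
--
--         ha[entry[1]] = entry[0]
--     return sorted(sets)
-- ===== SOURCE B (Python) =====
-- def formula1(log):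
--     if not log:
--         return []
--     prev = {}
--     gaps = []
--     for entry in sorted(log):
--         gaps.append((entry[0] - prev.get(entry[1], 0), entry[1]))
--         prev[entry[1]] = entry[0]
--     m = min(g for g, _ in gaps)
--     return sorted({i for g, i in gaps if g == m})
-- ===== Notes on version B (the rewrite author's own statement) =====
-- stated objective: simpler
-- what changed: Instead of A's streaming running-minimum with set-clearing and a -1 sentinel, B collects all (gap, id) pairs in one pass over the sorted log, then takes the global minimum and filters the ids that attain it.
-- intended difference: On logs of length >= 2 whose minimum timestamp is exactly -1 (all timestamps >= -1), A's '-1' sentinel collides with real data and restarts its running minimum, so A returns ids measured against a restarted minimum (e.g. A([(-1,'a'),(2,'b'),(3,'b')]) = ['b']); B returns the ids attaining the true minimum gap (['a'] there), which is the intended value. — e.g. on formula1([(-1, "a"), (2, "b"), (3, "b")]): A returns ["b"], B returns ["a"]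
import Mathlib
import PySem

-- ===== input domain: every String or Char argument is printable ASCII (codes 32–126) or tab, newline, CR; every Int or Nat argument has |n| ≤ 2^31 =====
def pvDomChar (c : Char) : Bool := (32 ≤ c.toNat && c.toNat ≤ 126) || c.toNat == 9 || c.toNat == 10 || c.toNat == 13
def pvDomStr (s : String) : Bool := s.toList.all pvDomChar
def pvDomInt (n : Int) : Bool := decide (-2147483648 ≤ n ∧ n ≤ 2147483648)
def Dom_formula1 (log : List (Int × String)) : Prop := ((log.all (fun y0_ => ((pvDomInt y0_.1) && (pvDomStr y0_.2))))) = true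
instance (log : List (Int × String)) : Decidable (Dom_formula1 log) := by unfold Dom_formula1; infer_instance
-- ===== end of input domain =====

-- B replaces A's streaming running-minimum with set-clearing and a -1 sentinel by
-- collect-all-(gap,id)-pairs, then global min and filter (simpler decomposition, same cost).

-- ===== PORT A =====
-- A's loop body; state = (ha, sets, mintemp)
def stepA (st : PySem.Dict String Int × PySem.Set String × Int) (e : Int × String) :
    PySem.Dict String Int × PySem.Set String × Int :=
  let ha := st.1
  let sets := st.2.1
  let m0 := st.2.2
  let m1 := if m0 == -1 then e.1 else m0                -- if mintemp == -1: mintemp = entry[0]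
  let g := e.1 - ha.getD e.2 0                          -- entry[0] - ha.get(entry[1], 0)
  if g ≤ m1 then
    if g < m1 then
      -- sets.clear(); mintemp = entry[0] - ha[entry[1]]; sets.add(entry[1]).
      -- (when this branch runs the key entry[1] is always present in ha — proved as part of
      -- the loop invariant below — so getD returns exactly Python's ha[entry[1]])
      (ha.insert e.2 e.1, PySem.Set.add PySem.Set.empty e.2, e.1 - ha.getD e.2 0)
    else
      (ha.insert e.2 e.1, PySem.Set.add sets e.2, m1)
  else
    (ha.insert e.2 e.1, sets, m1)

def formula1 (log : List (Int × String)) : List String :=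
  let fin := (PySem.List.sorted2 log Prod.fst Prod.snd).foldl stepA
      (PySem.Dict.empty, PySem.Set.empty, (-1 : Int))
  PySem.List.sorted fin.2.1 (fun x => x)

-- ===== PORT B =====
-- B's loop body; state = (gaps, prev)
def stepB (st : List (Int × String) × PySem.Dict String Int) (e : Int × String) :
    List (Int × String) × PySem.Dict String Int :=
  (st.1 ++ [(e.1 - st.2.getD e.2 0, e.2)], st.2.insert e.2 e.1)

def formula1_alt (log : List (Int × String)) : List String :=
  if log = [] then []
  else
    let gaps := ((PySem.List.sorted2 log Prod.fst Prod.snd).foldl stepB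
        ([], PySem.Dict.empty)).1
    match PySem.List.min? (gaps.map Prod.fst) (fun x => x) with
    | none => []
    | some m =>
        PySem.List.sorted
          (PySem.Set.ofList ((gaps.filter (fun p => p.1 == m)).map Prod.snd)) (fun x => x)

-- ===== PRECONDITION & SPEC =====
-- On logs of length ≥ 2 whose minimum timestamp is exactly -1 (all timestamps ≥ -1), A's
-- '-1' sentinel collides with real data and restarts its running minimum, so A returns ids
-- measured against a restarted minimum; B returns the ids attaining the true minimum gap,
-- which is the intended value.
def D_formula1 (log : List (Int × String)) : Prop :=
  2 ≤ log.length ∧ (-1 : Int) ∈ log.map Prod.fst ∧ ∀ t ∈ log.map Prod.fst, (-1 : Int) ≤ t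
instance (log : List (Int × String)) : Decidable (D_formula1 log) := by
  unfold D_formula1; infer_instance

def Spec_formula1 (log : List (Int × String)) (out : List String) : Prop :=
  ¬ D_formula1 log → out = formula1_alt log
instance (log : List (Int × String)) (out : List String) : Decidable (Spec_formula1 log out) := by
  unfold Spec_formula1; infer_instance

def pvDiffWitness_formula1 : (List (Int × String)) := [(-1, "a"), (2, "b"), (3, "b")]
def pvDiffWitnessOut_formula1 : (List String) × (List String) := (["b"], ["a"])

-- ===== CLAIM (what is proved, stated in full; the proofs are below) =====
def Claim_unchanged_formula1 : Prop :=
  ∀ (log : List (Int × String)), Dom_formula1 log → Spec_formula1 log (formula1 log)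
def Claim_changed_formula1 : Prop :=
  Dom_formula1 (pvDiffWitness_formula1) ∧ D_formula1 (pvDiffWitness_formula1) ∧
  formula1 (pvDiffWitness_formula1) = pvDiffWitnessOut_formula1.1 ∧
  formula1_alt (pvDiffWitness_formula1) = pvDiffWitnessOut_formula1.2 ∧
  pvDiffWitnessOut_formula1.1 ≠ pvDiffWitnessOut_formula1.2

-- ===== LEMMAS AND PROOFS =====

-- Python's tuple comparison used by sorted(log)
def lt2 : (Int × String) → (Int × String) → Bool := fun a b =>
  decide (a.1 < b.1) || (!decide (b.1 < a.1) && decide (a.2 < b.2))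

theorem sorted2_eq_foldl (xs : List (Int × String)) :
    PySem.List.sorted2 xs Prod.fst Prod.snd =
      xs.foldl (fun acc x => PySem.List.insertBy lt2 x acc) [] := rfl

theorem insertBy_lt2_pairwise (x : Int × String) (l : List (Int × String))
    (h : l.Pairwise (fun a b => a.1 ≤ b.1)) :
    (PySem.List.insertBy lt2 x l).Pairwise (fun a b => a.1 ≤ b.1) := by
  induction l with
  | nil => simp [PySem.List.insertBy]
  | cons y ys ih =>
    rcases List.pairwise_cons.mp h with ⟨hy, hys⟩
    rw [PySem.List.insertBy]
    by_cases hb : lt2 x y = true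
    · have hxy : x.1 ≤ y.1 := by
        simp only [lt2, Bool.or_eq_true, Bool.and_eq_true, Bool.not_eq_true',
          decide_eq_true_eq, decide_eq_false_iff_not] at hb
        rcases hb with h1 | ⟨h1, _⟩ <;> omega
      simp only [hb, if_true]
      refine List.pairwise_cons.mpr ⟨?_, h⟩
      intro z hz
      rcases List.mem_cons.mp hz with rfl | hz
      · exact hxy
      · exact le_trans hxy (hy z hz)
    · have hyx : y.1 ≤ x.1 := by
        have h1 : ¬ x.1 < y.1 := by
          intro hc
          exact hb (by simp [lt2, hc])
        omega
      simp only [hb, if_false, Bool.false_eq_true]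
      refine List.pairwise_cons.mpr ⟨?_, ih hys⟩
      intro z hz
      rcases (PySem.List.mem_insertBy lt2 x z ys).mp hz with rfl | hz
      · exact hyx
      · exact hy z hz

theorem foldl_insertBy_lt2_pairwise (xs : List (Int × String)) :
    ∀ acc : List (Int × String), acc.Pairwise (fun a b => a.1 ≤ b.1) →
      (xs.foldl (fun acc x => PySem.List.insertBy lt2 x acc) acc).Pairwise
        (fun a b => a.1 ≤ b.1) := by
  induction xs with
  | nil => intro acc h; simpa using h
  | cons x r ih =>
    intro acc h
    exact ih _ (insertBy_lt2_pairwise x acc h)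

theorem sorted2_fst_pairwise (xs : List (Int × String)) :
    (PySem.List.sorted2 xs Prod.fst Prod.snd).Pairwise (fun a b => a.1 ≤ b.1) := by
  rw [sorted2_eq_foldl]
  exact foldl_insertBy_lt2_pairwise xs [] (by simp)

-- the (gap, id) list B builds, as a recursion
def gapsS (d : PySem.Dict String Int) : List (Int × String) → List (Int × String)
  | [] => []
  | e :: r => (e.1 - d.getD e.2 0, e.2) :: gapsS (d.insert e.2 e.1) r

theorem foldB (s : List (Int × String)) :
    ∀ (acc : List (Int × String)) (d : PySem.Dict String Int),
      (s.foldl stepB (acc, d)).1 = acc ++ gapsS d s := by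
  induction s with
  | nil => intro acc d; simp [gapsS]
  | cons e r ih =>
    intro acc d
    simp only [List.foldl_cons, stepB, gapsS]
    rw [ih]
    simp

-- the running minimum A maintains, as a fold over the gap list
def gmin (a : Int) (p : Int × String) : Int := min a p.1

theorem gmin_le (l : List (Int × String)) (a : Int) :
    l.foldl gmin a ≤ a ∧ ∀ p ∈ l, l.foldl gmin a ≤ p.1 := by
  have h : l.foldl gmin a = (l.map Prod.fst).foldl min a := by
    rw [List.foldl_map]; rfl
  rw [h]
  rcases PySem.List.foldl_min_le (l.map Prod.fst) a with ⟨h1, h2⟩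
  exact ⟨h1, fun p hp => h2 p.1 (List.mem_map_of_mem hp)⟩

-- main invariant of A's loop
theorem loopA (s : List (Int × String)) :
    ∀ (ha : PySem.Dict String Int) (sets : PySem.Set String) (m : Int),
      s.Pairwise (fun a b => a.1 ≤ b.1) →
      (0 ≤ m ∨ m ≤ -2) →
      (∀ e ∈ s, m ≤ e.1) →
      (∀ e ∈ s, ∀ v, ha.get? e.2 = some v → v ≤ e.1) →
      sets.Nodup →
      ((s.foldl stepA (ha, sets, m)).2.2 = (gapsS ha s).foldl gmin m)
      ∧ (∀ x, x ∈ (s.foldl stepA (ha, sets, m)).2.1 ↔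
          ((x ∈ sets ∧ (gapsS ha s).foldl gmin m = m)
           ∨ ∃ p ∈ gapsS ha s, p.2 = x ∧ p.1 = (gapsS ha s).foldl gmin m))
      ∧ (s.foldl stepA (ha, sets, m)).2.1.Nodup := by
  induction s with
  | nil =>
    intro ha sets m _ _ _ _ hnd
    simp [gapsS, hnd]
  | cons e r ih =>
    intro ha sets m hpair hm hle hha hnd
    rcases List.pairwise_cons.mp hpair with ⟨hhd, hpair'⟩
    set g : Int := e.1 - ha.getD e.2 0 with hg
    have hg0 : 0 ≤ m → 0 ≤ g := by
      intro hm0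
      cases hget : ha.get? e.2 with
      | none =>
        have : ha.getD e.2 0 = 0 := by
          rw [PySem.Dict.getD_eq_get?_getD, hget]; rfl
        have := hle e List.mem_cons_self
        omega
      | some v =>
        have : ha.getD e.2 0 = v := by
          rw [PySem.Dict.getD_eq_get?_getD, hget]; rfl
        have := hha e List.mem_cons_self v hget
        omega
    have hbeq : (m == (-1 : Int)) = false := by
      rcases hm with hm0 | hm0 <;> (apply beq_eq_false_iff_ne.mpr; omega)
    have hstep : stepA (ha, sets, m) e =
        (ha.insert e.2 e.1,
         (if g < m then PySem.Set.add PySem.Set.empty e.2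
          else if g = m then PySem.Set.add sets e.2 else sets),
         min m g) := by
      simp only [stepA, hbeq, Bool.false_eq_true, if_false, ← hg]
      split_ifs with h1 h2 h3 <;> try (exfalso; omega)
      · have : min m g = g := by omega
        rw [this]
      · have : min m g = m := by omega
        rw [this]
      · have : min m g = m := by omega
        rw [this]
    have hGg : gapsS ha (e :: r) = (g, e.2) :: gapsS (ha.insert e.2 e.1) r := rfl
    have hm' : 0 ≤ min m g ∨ min m g ≤ -2 := by
      rcases hm with hm0 | hm0
      · left; have := hg0 hm0; omega
      · right; omega
    have hle' : ∀ e' ∈ r, min m g ≤ e'.1 := by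
      intro e' he'
      have := hle e' (List.mem_cons_of_mem e he')
      omega
    have hha' : ∀ e' ∈ r, ∀ v, (ha.insert e.2 e.1).get? e'.2 = some v → v ≤ e'.1 := by
      intro e' he' v hv
      rw [PySem.Dict.get?_insert] at hv
      by_cases hk : e'.2 = e.2
      · rw [if_pos hk] at hv
        cases hv
        exact hhd e' he'
      · rw [if_neg hk] at hv
        exact hha e' (List.mem_cons_of_mem e he') v hv
    have hnd' : (if g < m then PySem.Set.add PySem.Set.empty e.2
        else if g = m then PySem.Set.add sets e.2 else sets).Nodup := by
      split_ifs with h1 h2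
      · exact PySem.Set.nodup_add PySem.Set.empty e.2 (by simp [PySem.Set.empty])
      · exact PySem.Set.nodup_add sets e.2 hnd
      · exact hnd
    have IH := ih (ha.insert e.2 e.1)
      (if g < m then PySem.Set.add PySem.Set.empty e.2
       else if g = m then PySem.Set.add sets e.2 else sets)
      (min m g) hpair' hm' hle' hha' hnd'
    rcases IH with ⟨IH1, IH2, IH3⟩
    have hfold : (e :: r).foldl stepA (ha, sets, m) =
        r.foldl stepA (ha.insert e.2 e.1,
          (if g < m then PySem.Set.add PySem.Set.empty e.2
           else if g = m then PySem.Set.add sets e.2 else sets),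
          min m g) := by
      rw [List.foldl_cons, hstep]
    have hgfold : (gapsS ha (e :: r)).foldl gmin m =
        (gapsS (ha.insert e.2 e.1) r).foldl gmin (min m g) := by
      rw [hGg, List.foldl_cons]; rfl
    set M := (gapsS (ha.insert e.2 e.1) r).foldl gmin (min m g) with hM
    have hMle : M ≤ min m g := (gmin_le _ _).1
    refine ⟨?_, ?_, ?_⟩
    · rw [hfold, hgfold]; exact IH1
    · intro x
      rw [hfold, hgfold]
      rw [IH2 x]
      rw [hGg]
      constructor
      · rintro (⟨hx, hMm⟩ | ⟨p, hp, hpx, hpM⟩)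
        · split_ifs at hx with h1 h2
          · -- g < m: M = min m g = g and x = e.2
            rcases (PySem.Set.mem_add PySem.Set.empty e.2 x).mp hx with hx0 | hx2
            · simp [PySem.Set.empty] at hx0
            · right
              exact ⟨(g, e.2), List.mem_cons_self, hx2.symm, by omega⟩
          · -- g = m
            rcases (PySem.Set.mem_add sets e.2 x).mp hx with hx0 | hx2
            · left; exact ⟨hx0, by omega⟩
            · right
              exact ⟨(g, e.2), List.mem_cons_self, hx2.symm, by omega⟩
          · left; exact ⟨hx, by omega⟩
        · right
          exact ⟨p, List.mem_cons_of_mem _ hp, hpx, hpM⟩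
      · rintro (⟨hx, hMm⟩ | ⟨p, hp, hpx, hpM⟩)
        · -- M = m: no clear happened, m ≤ min m g so g ≥ m
          have hgm : ¬ g < m := by omega
          left
          refine ⟨?_, by omega⟩
          rw [if_neg hgm]
          by_cases h2 : g = m
          · rw [if_pos h2]
            exact (PySem.Set.mem_add sets e.2 x).mpr (Or.inl hx)
          · rw [if_neg h2]
            exact hx
        · rcases List.mem_cons.mp hp with rfl | hp'
          · -- the head gap attains M, so g = M ≤ min m g ≤ g, hence M = g = min m g
            have hgM : g = M := hpM
            have h1 : g < m ∨ g = m := by omega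
            left
            refine ⟨?_, by omega⟩
            rcases h1 with h1 | h1
            · rw [if_pos h1]
              exact (PySem.Set.mem_add PySem.Set.empty e.2 x).mpr (Or.inr hpx.symm)
            · rw [if_neg (show ¬ g < m by omega), if_pos h1]
              exact (PySem.Set.mem_add sets e.2 x).mpr (Or.inr hpx.symm)
          · right; exact ⟨p, hp', hpx, hpM⟩
    · rw [hfold]; exact IH3

-- the two results have the same elements, are Nodup, and both are sorted with key id
theorem sorted_eq_of_mem_iff (l1 l2 : List String) (h1 : l1.Nodup) (h2 : l2.Nodup)
    (h : ∀ x, x ∈ l1 ↔ x ∈ l2) :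
    PySem.List.sorted l1 (fun x => x) = PySem.List.sorted l2 (fun x => x) := by
  exact (PySem.List.sorted_id_eq_sorted_id_iff_perm l1 l2).mpr
    ((List.perm_ext_iff_of_nodup h1 h2).mpr h)

theorem formula1_eq_alt_of_head_ne (log : List (Int × String)) (e0 : Int × String)
    (tail : List (Int × String))
    (hs : PySem.List.sorted2 log Prod.fst Prod.snd = e0 :: tail)
    (ht0 : e0.1 ≠ -1) :
    formula1 log = formula1_alt log := by
  have hperm : (e0 :: tail).Perm log := by
    rw [← hs]; exact PySem.List.sorted2_perm log Prod.fst Prod.snd false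
  have hlogne : log ≠ [] := by
    intro h
    rw [h] at hperm
    exact (List.cons_ne_nil e0 tail) hperm.eq_nil
  have hpair : (e0 :: tail).Pairwise (fun a b => a.1 ≤ b.1) := by
    rw [← hs]; exact sorted2_fst_pairwise log
  rcases List.pairwise_cons.mp hpair with ⟨hhd, hpair'⟩
  -- A's first iteration
  have hstep0 : stepA (PySem.Dict.empty, PySem.Set.empty, (-1 : Int)) e0 =
      (PySem.Dict.empty.insert e0.2 e0.1, PySem.Set.add PySem.Set.empty e0.2, e0.1) := by
    simp [stepA, PySem.Dict.getD_empty]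
  have hA : formula1 log = PySem.List.sorted
      ((tail.foldl stepA (PySem.Dict.empty.insert e0.2 e0.1,
        PySem.Set.add PySem.Set.empty e0.2, e0.1)).2.1) (fun x => x) := by
    unfold formula1
    rw [hs, List.foldl_cons, hstep0]
  have hm0 : (0 : Int) ≤ e0.1 ∨ e0.1 ≤ -2 := by omega
  have hha0 : ∀ e ∈ tail, ∀ v,
      (PySem.Dict.empty.insert e0.2 e0.1).get? e.2 = some v → v ≤ e.1 := by
    intro e he v hv
    rw [PySem.Dict.get?_insert] at hv
    by_cases hk : e.2 = e0.2
    · rw [if_pos hk] at hv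
      cases hv
      exact hhd e he
    · rw [if_neg hk] at hv
      simp [PySem.Dict.get?_empty] at hv
  have hsets0 : (PySem.Set.add PySem.Set.empty e0.2 : List String) = [e0.2] := rfl
  have hnd0 : (PySem.Set.add PySem.Set.empty e0.2).Nodup := by
    rw [hsets0]; exact List.nodup_singleton _
  have main := loopA tail (PySem.Dict.empty.insert e0.2 e0.1)
      (PySem.Set.add PySem.Set.empty e0.2) e0.1 hpair' hm0 hhd hha0 hnd0
  rcases main with ⟨hmF, hmem, hnodF⟩
  -- B's gap list
  have hgaps : ((PySem.List.sorted2 log Prod.fst Prod.snd).foldl stepB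
      ([], PySem.Dict.empty)).1 =
      (e0.1, e0.2) :: gapsS (PySem.Dict.empty.insert e0.2 e0.1) tail := by
    rw [hs, foldB]
    simp [gapsS, PySem.Dict.getD_empty]
  have hminB : PySem.List.min?
      (((e0.1, e0.2) :: gapsS (PySem.Dict.empty.insert e0.2 e0.1) tail).map Prod.fst)
      (fun x => x) = some ((gapsS (PySem.Dict.empty.insert e0.2 e0.1) tail).foldl gmin e0.1) := by
    rw [List.map_cons, PySem.List.min?_id_cons]
    congr 1
    rw [List.foldl_map]
    rfl
  have hB : formula1_alt log = PySem.List.sorted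
      (PySem.Set.ofList ((((e0.1, e0.2) :: gapsS (PySem.Dict.empty.insert e0.2 e0.1) tail).filter
        (fun p => p.1 == (gapsS (PySem.Dict.empty.insert e0.2 e0.1) tail).foldl gmin e0.1)).map
          Prod.snd)) (fun x => x) := by
    unfold formula1_alt
    rw [if_neg hlogne]
    simp only [hgaps, hminB]
  rw [hA, hB]
  apply sorted_eq_of_mem_iff _ _ hnodF (PySem.Set.nodup_ofList _)
  intro x
  rw [hmem x]
  rw [PySem.Set.mem_ofList]
  simp only [List.mem_map, List.mem_filter, beq_iff_eq]
  constructor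
  · rintro (⟨hx, hMm⟩ | ⟨p, hp, hpx, hpM⟩)
    · rw [hsets0, List.mem_singleton] at hx
      exact ⟨(e0.1, e0.2), ⟨List.mem_cons_self, hMm.symm⟩, hx.symm⟩
    · exact ⟨p, ⟨List.mem_cons_of_mem _ hp, hpM⟩, hpx⟩
  · rintro ⟨p, ⟨hp, hpM⟩, hpx⟩
    rcases List.mem_cons.mp hp with rfl | hp'
    · left
      refine ⟨?_, hpM.symm⟩
      rw [hsets0, List.mem_singleton]
      exact hpx.symm
    · right; exact ⟨p, hp', hpx, hpM⟩

theorem sorted_id_singleton (x : String) :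
    PySem.List.sorted [x] (fun y => y) = [x] := by
  rw [PySem.List.sorted_eq_foldl_insertBy]
  simp [PySem.List.insertBy]

-- ===== VERDICT (by name: the statement is the Claim_ definition above) =====
theorem formula1_spec : Claim_unchanged_formula1 := by
  unfold Claim_unchanged_formula1
  intro log _ hnD
  show formula1 log = formula1_alt log
  rcases hseq : PySem.List.sorted2 log Prod.fst Prod.snd with _ | ⟨e0, tail⟩
  · -- log is empty
    have hperm : ([] : List (Int × String)).Perm log := by
      rw [← hseq]; exact PySem.List.sorted2_perm log Prod.fst Prod.snd false
    have hlog : log = [] := hperm.symm.eq_nil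
    subst hlog
    rfl
  · rcases htail : tail with _ | ⟨e1, rest⟩
    · -- singleton log: both return [e0.2]
      subst htail
      have hperm : [e0].Perm log := by
        rw [← hseq]; exact PySem.List.sorted2_perm log Prod.fst Prod.snd false
      have hlog : log = [e0] := (List.perm_singleton.mp hperm.symm)
      subst hlog
      have hs1 : PySem.List.sorted2 [e0] Prod.fst Prod.snd = [e0] := hseq
      have hofl : PySem.Set.ofList [e0.2] = [e0.2] :=
        PySem.Set.ofList_eq_self_of_nodup _ (List.nodup_singleton _)
      have hA : formula1 [e0] = [e0.2] := by
        unfold formula1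
        rw [hs1]
        simp only [List.foldl_cons, List.foldl_nil]
        rw [show stepA (PySem.Dict.empty, PySem.Set.empty, (-1 : Int)) e0 =
            (PySem.Dict.empty.insert e0.2 e0.1, PySem.Set.add PySem.Set.empty e0.2, e0.1) by
          simp [stepA, PySem.Dict.getD_empty]]
        exact sorted_id_singleton e0.2
      have hB : formula1_alt [e0] = [e0.2] := by
        unfold formula1_alt
        rw [if_neg (by simp)]
        rw [hs1]
        simp only [List.foldl_cons, List.foldl_nil, stepB]
        simp only [PySem.Dict.getD_empty, List.nil_append, List.map_cons, List.map_nil,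
          PySem.List.min?_id_cons, List.foldl_nil]
        simp only [List.filter, beq_self_eq_true, List.map_cons, List.map_nil]
        rw [hofl]
        exact sorted_id_singleton e0.2
      rw [hA, hB]
    · -- length ≥ 2 : the sentinel never refires because e0.1 ≠ -1 outside D_
      subst htail
      have hperm : (e0 :: e1 :: rest).Perm log := by
        rw [← hseq]; exact PySem.List.sorted2_perm log Prod.fst Prod.snd false
      have hpair : (e0 :: e1 :: rest).Pairwise (fun a b => a.1 ≤ b.1) := by
        rw [← hseq]; exact sorted2_fst_pairwise log
      have ht0 : e0.1 ≠ -1 := by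
        intro h0
        apply hnD
        refine ⟨?_, ?_, ?_⟩
        · have := hperm.length_eq
          simp at this
          omega
        · have he0 : e0 ∈ log := hperm.mem_iff.mp List.mem_cons_self
          rw [← h0]
          exact List.mem_map_of_mem he0
        · intro t ht
          rcases List.mem_map.mp ht with ⟨e, he, rfl⟩
          have he' : e ∈ e0 :: e1 :: rest := hperm.symm.mem_iff.mp he
          rcases List.mem_cons.mp he' with rfl | he''
          · omega
          · have := (List.pairwise_cons.mp hpair).1 e he''
            omega
      exact formula1_eq_alt_of_head_ne log e0 (e1 :: rest) hseq ht0

theorem formula1_changed : Claim_changed_formula1 := by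
  unfold Claim_changed_formula1
  exact ⟨by decide, by decide, by rfl, by rfl, by decide⟩
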